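-- pv_equiv track=rewrite | github.com/yeonwoo1125/cospro-python-study | srin/answer/단체_유니폼_맞추기.py | solution
-- ===== SOURCE A (Python) =====
-- def solution(people):
-- 	answer = [0 for _ in range(4)]
-- 	for i in people :
-- 		if i >= 105 :
-- 			answer[3]+=1
-- 		elif i >= 100 :
-- 			answer[2] +=1
-- 		elif i >= 95 :
-- 			answer[1] +=1
-- 		else :
-- 			answer[0] +=1
-- 	return answer
-- ===== SOURCE B (Python) =====
-- def solution(people):
--     n = len(people)
--     ge95 = sum(1 for i in people if i >= 95)
--     ge100 = sum(1 for i in people if i >= 100)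
--     ge105 = sum(1 for i in people if i >= 105)
--     return [n - ge95, ge95 - ge100, ge100 - ge105, ge105]
-- ===== Notes on version B (the rewrite author's own statement) =====
-- stated objective: alternative
-- what changed: Instead of one pass assigning each person to a bucket, B computes the three cumulative counts of people at or above each threshold (>=95, >=100, >=105) in separate passes and derives the four bucket sizes by differencing adjacent cumulative counts.
import Mathlib
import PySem

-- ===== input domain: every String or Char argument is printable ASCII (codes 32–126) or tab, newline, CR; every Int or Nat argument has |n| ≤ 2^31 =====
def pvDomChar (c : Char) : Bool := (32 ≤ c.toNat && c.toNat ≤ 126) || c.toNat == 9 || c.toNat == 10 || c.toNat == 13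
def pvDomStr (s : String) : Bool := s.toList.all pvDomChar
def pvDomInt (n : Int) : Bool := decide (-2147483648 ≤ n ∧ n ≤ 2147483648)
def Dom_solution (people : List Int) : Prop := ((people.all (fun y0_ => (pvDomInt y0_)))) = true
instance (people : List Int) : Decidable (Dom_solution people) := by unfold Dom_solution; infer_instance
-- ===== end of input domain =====

-- B replaces A's per-element four-way bucket assignment with three staged cumulative
-- threshold counts (>=95, >=100, >=105) combined by differencing (alternative decomposition).

-- ===== PORT A =====
def solution (people : List Int) : List Int :=
  people.foldl
    (fun answer i =>
      if i ≥ 105 then answer.set 3 (answer.getD 3 0 + 1)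
      else if i ≥ 100 then answer.set 2 (answer.getD 2 0 + 1)
      else if i ≥ 95 then answer.set 1 (answer.getD 1 0 + 1)
      else answer.set 0 (answer.getD 0 0 + 1))
    [0, 0, 0, 0]

-- ===== PORT B =====
-- sum(1 for i in people if i >= t) ported as a count of the elements satisfying the predicate
def solution_alt (people : List Int) : List Int :=
  let n : Int := people.length
  let ge95 : Int := people.countP (fun i => i ≥ 95)
  let ge100 : Int := people.countP (fun i => i ≥ 100)
  let ge105 : Int := people.countP (fun i => i ≥ 105)
  [n - ge95, ge95 - ge100, ge100 - ge105, ge105]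

-- ===== PRECONDITION & SPEC =====
def Spec_solution (people : List Int) (out : List Int) : Prop := out = solution_alt people
instance (people : List Int) (out : List Int) : Decidable (Spec_solution people out) := by unfold Spec_solution; infer_instance

-- ===== CLAIM (what is proved, stated in full; the proofs are below) =====
def Claim_equal_solution : Prop := ∀ (people : List Int), Dom_solution people → Spec_solution people (solution people)

-- ===== LEMMAS AND PROOFS =====

-- A's fold, started from an arbitrary 4-element state, adds the count of each disjoint band.
theorem solution_fold (people : List Int) (a b c d : Int) :
    people.foldl
      (fun answer i =>
        if i ≥ 105 then answer.set 3 (answer.getD 3 0 + 1)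
        else if i ≥ 100 then answer.set 2 (answer.getD 2 0 + 1)
        else if i ≥ 95 then answer.set 1 (answer.getD 1 0 + 1)
        else answer.set 0 (answer.getD 0 0 + 1))
      [a, b, c, d] =
    [a + ((people.countP (fun i => !decide (i ≥ 95))) : Int),
     b + ((people.countP (fun i => decide (i ≥ 95) && !decide (i ≥ 100))) : Int),
     c + ((people.countP (fun i => decide (i ≥ 100) && !decide (i ≥ 105))) : Int),
     d + ((people.countP (fun i => decide (i ≥ 105))) : Int)] := by
  induction people generalizing a b c d with
  | nil => simp
  | cons x xs ih =>
    rw [List.foldl_cons]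
    by_cases h1 : x ≥ 105
    · rw [if_pos h1, show ([a,b,c,d].set 3 ([a,b,c,d].getD 3 0 + 1)) = [a,b,c,d+1] from rfl, ih]
      simp [show decide (x ≥ 95) = true by simp; omega,
        show decide (x ≥ 100) = true by simp; omega, show decide (x ≥ 105) = true by simp [h1]]
      omega
    · rw [if_neg h1]
      by_cases h2 : x ≥ 100
      · rw [if_pos h2, show ([a,b,c,d].set 2 ([a,b,c,d].getD 2 0 + 1)) = [a,b,c+1,d] from rfl, ih]
        simp [show decide (x ≥ 95) = true by simp; omega,
          show decide (x ≥ 100) = true by simp [h2], show decide (x ≥ 105) = false by simp [h1]]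
        omega
      · rw [if_neg h2]
        by_cases h3 : x ≥ 95
        · rw [if_pos h3, show ([a,b,c,d].set 1 ([a,b,c,d].getD 1 0 + 1)) = [a,b+1,c,d] from rfl, ih]
          simp [show decide (x ≥ 95) = true by simp [h3],
            show decide (x ≥ 100) = false by simp [h2], show decide (x ≥ 105) = false by simp [h1]]
          omega
        · rw [if_neg h3, show ([a,b,c,d].set 0 ([a,b,c,d].getD 0 0 + 1)) = [a+1,b,c,d] from rfl, ih]
          simp [show decide (x ≥ 95) = false by simp [h3],
            show decide (x ≥ 100) = false by simp [h2], show decide (x ≥ 105) = false by simp [h1]]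
          omega

-- The staged cumulative counts decompose into the disjoint bands.
theorem counts_aux (people : List Int) :
    ((people.length : Int) =
        (people.countP (fun i => !decide (i ≥ 95)) : Int) + (people.countP (fun i => decide (i ≥ 95)) : Int)) ∧
    ((people.countP (fun i => decide (i ≥ 95)) : Int) =
        (people.countP (fun i => decide (i ≥ 95) && !decide (i ≥ 100)) : Int) + (people.countP (fun i => decide (i ≥ 100)) : Int)) ∧
    ((people.countP (fun i => decide (i ≥ 100)) : Int) =
        (people.countP (fun i => decide (i ≥ 100) && !decide (i ≥ 105)) : Int) + (people.countP (fun i => decide (i ≥ 105)) : Int)) := by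
  induction people with
  | nil => simp
  | cons x xs ih =>
    obtain ⟨ih1, ih2, ih3⟩ := ih
    simp only [List.countP_cons, List.length_cons]
    simp only [ge_iff_le] at ih1 ih2 ih3 ⊢
    by_cases h1 : x ≥ 105 <;> by_cases h2 : x ≥ 100 <;> by_cases h3 : x ≥ 95 <;>
      simp [h1, h2, h3] <;> push_cast <;> omega

-- ===== VERDICT (by name: the statement is the Claim_ definition above) =====
theorem solution_spec : Claim_equal_solution := by
  intro people _
  unfold Spec_solution solution solution_alt
  rw [solution_fold]
  obtain ⟨h1, h2, h3⟩ := counts_aux people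
  simp only [List.cons.injEq, and_true]
  refine ⟨by omega, by omega, by omega, by omega⟩
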